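-- pv_equiv track=rewrite | github.com/judebattista/CS355_Homework | hw04/dNbhd.py | genCousinsOfD
-- ===== SOURCE A (Python) =====
-- from itertools import combinations, product, chain
--
-- def genCousinsOfD(kmer, alphabet, distance):
--     # Generate all the possible locations for replacement
--     for positions in combinations(range(len(kmer)), distance):
--         #generate a every possible set of values to fill in each set of locations
--         # ... kind of. We will not include the last letter in the alphabet
--         for replacements in product(range(len(alphabet) - 1), repeat=distance):
--             # work with a list rather than a string for efficiency
--             cousin = list(kmer)
--             for pos, rep in zip(positions, replacements):
--                 # if the letter is the same as the replacement, replace it with the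
--                 # 'spare' letter from the alphabet
--                 if cousin[pos] == alphabet[rep]:
--                     cousin[pos] = alphabet[-1]
--                 else:
--                     cousin[pos] = alphabet[rep]
--             yield ''.join(cousin)
-- ===== SOURCE B (Python) =====
-- def genCousinsOfD(kmer, alphabet, distance):
--     m = len(alphabet)
--     k = len(kmer)
--
--     def subsets(start, rem):
--         # strictly increasing position lists of length rem within [start, k)
--         if rem == 0:
--             yield []
--         elif rem > 0:
--             for p in range(start, k - rem + 1):
--                 for tail in subsets(p + 1, rem - 1):
--                     yield [p] + tail
--
--     def fill(ps, chars):
--         # substitute letters at the remaining positions ps, first position varies slowest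
--         if not ps:
--             yield ''.join(chars)
--             return
--         p, rest = ps[0], ps[1:]
--         for r in range(m - 1):
--             letter = alphabet[-1] if alphabet[r] == kmer[p] else alphabet[r]
--             child = chars.copy()
--             child[p] = letter
--             yield from fill(rest, child)
--
--     for ps in subsets(0, distance):
--         yield from fill(ps, list(kmer))
-- ===== Notes on version B (the rewrite author's own statement) =====
-- stated objective: alternative
-- what changed: Replaces itertools combinations+product with zip-driven in-place substitution by a budgeted recursion: position subsets are enumerated by a recursive generator over a start index, and for each subset the replacement letters are filled in by a recursion over the positions that shares common prefixes instead of rebuilding the whole cousin for every replacement tuple.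
import Mathlib
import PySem

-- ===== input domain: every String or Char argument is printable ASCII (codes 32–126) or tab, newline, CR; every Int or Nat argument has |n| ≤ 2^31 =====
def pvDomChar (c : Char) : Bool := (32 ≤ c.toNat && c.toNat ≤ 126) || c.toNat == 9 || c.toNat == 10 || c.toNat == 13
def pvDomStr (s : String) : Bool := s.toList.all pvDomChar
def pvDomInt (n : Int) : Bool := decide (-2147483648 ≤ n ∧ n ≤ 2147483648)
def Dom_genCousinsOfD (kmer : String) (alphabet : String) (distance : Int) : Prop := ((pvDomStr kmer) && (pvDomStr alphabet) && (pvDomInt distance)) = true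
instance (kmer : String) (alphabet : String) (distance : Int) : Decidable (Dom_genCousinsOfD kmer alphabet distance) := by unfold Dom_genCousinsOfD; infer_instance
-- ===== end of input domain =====

-- B replaces itertools combinations+product+zip-mutation with a budgeted recursion: position subsets come
-- from a recursive generator over a start index, letters are filled in by recursion over the chosen positions
-- sharing common prefixes (objective: alternative decomposition, same output in the same order).


-- ===== PORT A =====
-- itertools.product(range(m), repeat=d), hand port (tuples as lists; rightmost position varies fastest — exact)
def pvProdRep (m : Int) (d : Nat) : List (List Int) :=
  match d with
  | 0 => [[]]
  | Nat.succ d' => (PySem.List.pyRange 0 m 1).flatMap (fun r => (pvProdRep m d').map (fun t => r :: t))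

-- the body of A's 'for pos, rep in zip(positions, replacements)' loop (indices are always in range here)
def pvStepA (aL : List Char) (cousin : List Char) (pr : Int × Int) : List Char :=
  if PySem.List.pyGetD cousin pr.1 ' ' == PySem.List.pyGetD aL pr.2 ' ' then
    PySem.List.pySetD cousin pr.1 (PySem.List.pyGetD aL (-1) ' ')
  else
    PySem.List.pySetD cousin pr.1 (PySem.List.pyGetD aL pr.2 ' ')

-- distance.toNat is exact for 0 ≤ distance; Python raises ValueError on negative distance (outside Pre_)
def genCousinsOfD (kmer : String) (alphabet : String) (distance : Int) : List String :=
  let kL := kmer.toList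
  let aL := alphabet.toList
  (PySem.List.combinations (PySem.List.pyRange 0 (kL.length : Int) 1) distance.toNat).foldl
    (fun acc positions =>
      (pvProdRep ((aL.length : Int) - 1) distance.toNat).foldl
        (fun acc reps =>
          acc ++ [String.ofList ((positions.zip reps).foldl (pvStepA aL) kL)]) acc) []

-- ===== PORT B =====
-- B's 'subsets(start, rem)' generator: increasing position lists of length rem within [start, k)
def pvSubsets (k : Int) (start : Int) (rem : Int) : List (List Int) :=
  if rem = 0 then [[]]
  else if 0 < rem then
    (PySem.List.pyRange start (k - rem + 1) 1).flatMap
      (fun p => (pvSubsets k (p + 1) (rem - 1)).map (fun t => p :: t))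
  else []
termination_by rem.toNat
decreasing_by omega

-- B's 'fill(ps, chars)' generator ('child = chars.copy(); child[p] = letter' is pySetD)
def pvFill (kL aL : List Char) (ps : List Int) (chars : List Char) : List String :=
  match ps with
  | [] => [String.ofList chars]
  | p :: rest =>
    (PySem.List.pyRange 0 ((aL.length : Int) - 1) 1).flatMap (fun r =>
      pvFill kL aL rest
        (PySem.List.pySetD chars p
          (if PySem.List.pyGetD aL r ' ' == PySem.List.pyGetD kL p ' ' then
            PySem.List.pyGetD aL (-1) ' '
          else
            PySem.List.pyGetD aL r ' ')))

def genCousinsOfD_alt (kmer : String) (alphabet : String) (distance : Int) : List String :=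
  (pvSubsets (kmer.toList.length : Int) 0 distance).flatMap
    (fun ps => pvFill kmer.toList alphabet.toList ps kmer.toList)

-- ===== PRECONDITION & SPEC =====
-- Pre_ excludes only negative distance, where Python A raises ValueError (from itertools.combinations)
def Pre_genCousinsOfD (kmer : String) (alphabet : String) (distance : Int) : Prop := 0 ≤ distance
instance (kmer : String) (alphabet : String) (distance : Int) : Decidable (Pre_genCousinsOfD kmer alphabet distance) := by unfold Pre_genCousinsOfD; infer_instance

def pvWitness_genCousinsOfD : String × String × Int := ("AC", "ACGT", 1)

def Spec_genCousinsOfD (kmer : String) (alphabet : String) (distance : Int) (out : List String) : Prop := out = genCousinsOfD_alt kmer alphabet distance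
instance (kmer : String) (alphabet : String) (distance : Int) (out : List String) : Decidable (Spec_genCousinsOfD kmer alphabet distance out) := by unfold Spec_genCousinsOfD; infer_instance

-- ===== CLAIM (what is proved, stated in full; the proofs are below) =====
def Claim_equal_genCousinsOfD : Prop := ∀ (kmer : String) (alphabet : String) (distance : Int), Dom_genCousinsOfD kmer alphabet distance → Pre_genCousinsOfD kmer alphabet distance → Spec_genCousinsOfD kmer alphabet distance (genCousinsOfD kmer alphabet distance)

-- ===== LEMMAS AND PROOFS =====

-- picking (r+1) indices from [start, k): CPython's combinations order = first index, then the rest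
theorem pvCombRange (r : Nat) (k : Int) : ∀ (n : Nat) (start : Int), (k - start).toNat = n →
    PySem.List.combinations (PySem.List.pyRange start k 1) (r + 1)
      = (PySem.List.pyRange start (k - r) 1).flatMap
          (fun p => (PySem.List.combinations (PySem.List.pyRange (p + 1) k 1) r).map (fun t => p :: t)) := by
  intro n
  induction n with
  | zero =>
    intro start h
    have hks : k ≤ start := by omega
    rw [PySem.List.pyRange_one_eq_nil hks, PySem.List.pyRange_one_eq_nil (by omega : k - r ≤ start)]
    simp [PySem.List.combinations_nil_succ]
  | succ n ih =>
    intro start h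
    have hsk : start < k := by omega
    rw [PySem.List.pyRange_one_cons hsk, PySem.List.combinations_cons_succ]
    by_cases hlt : start < k - r
    · rw [PySem.List.pyRange_one_cons hlt]
      rw [List.flatMap_cons]
      rw [ih (start + 1) (by omega)]
    · -- k - r ≤ start < k : both sides are empty
      rw [PySem.List.pyRange_one_eq_nil (by omega : k - r ≤ start)]
      have h1 : PySem.List.combinations (PySem.List.pyRange (start + 1) k 1) r = [] := by
        apply PySem.List.combinations_eq_nil_of_length_lt
        rw [PySem.List.length_pyRange_one]
        omega
      rw [h1, ih (start + 1) (by omega), PySem.List.pyRange_one_eq_nil (by omega : k - r ≤ start + 1)]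
      simp

-- B's subset generator is A's itertools.combinations over the index range
theorem pvSubsets_eq (r : Nat) : ∀ (k start : Int),
    pvSubsets k start (r : Int) = PySem.List.combinations (PySem.List.pyRange start k 1) r := by
  induction r with
  | zero => intro k start; rw [pvSubsets]; simp [PySem.List.combinations_zero]
  | succ r ih =>
    intro k start
    rw [pvSubsets]
    have h0 : ¬ ((r + 1 : Nat) : Int) = 0 := by omega
    have h1 : (0 : Int) < ((r + 1 : Nat) : Int) := by omega
    rw [if_neg h0, if_pos h1]
    have h2 : k - ((r + 1 : Nat) : Int) + 1 = k - r := by push_cast; ring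
    have h3 : ((r + 1 : Nat) : Int) - 1 = (r : Int) := by push_cast; ring
    rw [h2, h3, pvCombRange r k (k - start).toNat start rfl]
    exact List.flatMap_congr (fun p _ => by rw [ih])

-- B's fill recursion is A's product×zip substitution loop, given that the chosen positions are
-- distinct in-range indices and the current chars agree with kmer on all still-unprocessed positions
theorem pvFill_eq (kL aL : List Char) : ∀ (ps : List Int) (s : List Char),
    ps.Sublist (PySem.List.pyRange 0 (kL.length : Int) 1) →
    s.length = kL.length →
    (∀ q ∈ ps, PySem.List.pyGetD s q ' ' = PySem.List.pyGetD kL q ' ') →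
    pvFill kL aL ps s =
      (pvProdRep ((aL.length : Int) - 1) ps.length).map
        (fun reps => String.ofList ((ps.zip reps).foldl (pvStepA aL) s)) := by
  intro ps
  induction ps with
  | nil => intro s _ _ _; simp [pvFill, pvProdRep]
  | cons p rest ih =>
    intro s hsub hlen hagree
    have hmemrange : ∀ q ∈ p :: rest, 0 ≤ q ∧ q < (kL.length : Int) := by
      intro q hq
      exact (PySem.List.mem_pyRange_one).1 (hsub.mem hq)
    have hp : 0 ≤ p ∧ p < (kL.length : Int) := hmemrange p (by simp)
    have hnodup : (p :: rest).Nodup := hsub.nodup (PySem.List.nodup_pyRange_one 0 (kL.length : Int))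
    have hpnotin : p ∉ rest := fun hmem => (List.nodup_cons.1 hnodup).1 hmem
    rw [pvFill]
    have hprod : pvProdRep ((aL.length : Int) - 1) (p :: rest).length
        = (PySem.List.pyRange 0 ((aL.length : Int) - 1) 1).flatMap
            (fun r => (pvProdRep ((aL.length : Int) - 1) rest.length).map (fun t => r :: t)) := by
      simp [List.length_cons, pvProdRep]
    rw [hprod, List.map_flatMap]
    apply List.flatMap_congr
    intro r hr
    -- the letter chosen by B equals the letter chosen by A's step on the current cousin
    have hgetp : PySem.List.pyGetD s p ' ' = PySem.List.pyGetD kL p ' ' := hagree p (by simp)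
    have hletter : (if PySem.List.pyGetD aL r ' ' == PySem.List.pyGetD kL p ' ' then
            PySem.List.pyGetD aL (-1) ' ' else PySem.List.pyGetD aL r ' ')
        = (if PySem.List.pyGetD s p ' ' == PySem.List.pyGetD aL r ' ' then
            PySem.List.pyGetD aL (-1) ' ' else PySem.List.pyGetD aL r ' ') := by
      rw [hgetp, BEq.comm]
    set v := (if PySem.List.pyGetD s p ' ' == PySem.List.pyGetD aL r ' ' then
            PySem.List.pyGetD aL (-1) ' ' else PySem.List.pyGetD aL r ' ') with hv
    rw [hletter]
    have hset : PySem.List.pySetD s p v = s.set p.toNat v := PySem.List.pySetD_of_nonneg s v hp.1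
    have hih := ih (PySem.List.pySetD s p v)
      (List.Sublist.trans (List.sublist_cons_self p rest) hsub)
      (by rw [hset]; simpa using hlen)
      (by
        intro q hq
        have hqb := hmemrange q (List.mem_cons_of_mem p hq)
        have hqp : q ≠ p := fun h => hpnotin (h ▸ hq)
        rw [hset]
        have hq1 : q < ((s.set p.toNat v).length : Int) := by simpa [hlen] using hqb.2
        have hq2 : q < (s.length : Int) := by simpa [hlen] using hqb.2
        rw [PySem.List.pyGetD_eq_getElem _ ' ' hqb.1 hq1, List.getElem_set_ne (by omega),
            ← PySem.List.pyGetD_eq_getElem _ ' ' hqb.1 hq2]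
        exact hagree q (List.mem_cons_of_mem p hq))
    rw [hih, List.map_map]
    apply List.map_congr_left
    intro reps _
    simp only [Function.comp_apply, List.zip_cons_cons, List.foldl_cons]
    congr 1
    rw [pvStepA]
    rw [hv]
    by_cases hc : PySem.List.pyGetD s p ' ' == PySem.List.pyGetD aL r ' '
    · rw [if_pos hc, if_pos hc]
    · rw [if_neg hc, if_neg hc]

-- the two ports agree for every non-negative distance
theorem pvMain (kmer alphabet : String) (distance : Int) (hpre : 0 ≤ distance) :
    genCousinsOfD kmer alphabet distance = genCousinsOfD_alt kmer alphabet distance := by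
  have hd : ((distance.toNat : Nat) : Int) = distance := Int.toNat_of_nonneg hpre
  have hB : pvSubsets (kmer.toList.length : Int) 0 distance
      = PySem.List.combinations (PySem.List.pyRange 0 (kmer.toList.length : Int) 1) distance.toNat := by
    have h := pvSubsets_eq distance.toNat (kmer.toList.length : Int) 0
    rwa [hd] at h
  show List.foldl
      (fun acc positions =>
        List.foldl
          (fun acc reps =>
            acc ++ [String.ofList ((positions.zip reps).foldl (pvStepA alphabet.toList) kmer.toList)]) acc
          (pvProdRep ((alphabet.toList.length : Int) - 1) distance.toNat))
      [] (PySem.List.combinations (PySem.List.pyRange 0 (kmer.toList.length : Int) 1) distance.toNat)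
    = (pvSubsets (kmer.toList.length : Int) 0 distance).flatMap
        (fun ps => pvFill kmer.toList alphabet.toList ps kmer.toList)
  rw [hB]
  have hinner : ∀ (acc : List String) (positions : List Int),
      List.foldl
        (fun acc reps =>
          acc ++ [String.ofList ((positions.zip reps).foldl (pvStepA alphabet.toList) kmer.toList)]) acc
        (pvProdRep ((alphabet.toList.length : Int) - 1) distance.toNat)
      = acc ++ (pvProdRep ((alphabet.toList.length : Int) - 1) distance.toNat).map
          (fun reps => String.ofList ((positions.zip reps).foldl (pvStepA alphabet.toList) kmer.toList)) :=
    fun acc positions => PySem.List.foldl_append_singleton_eq_map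
      (fun reps => String.ofList ((positions.zip reps).foldl (pvStepA alphabet.toList) kmer.toList)) _ acc
  have houter := PySem.List.foldl_congr_mem
    (l := PySem.List.combinations (PySem.List.pyRange 0 (kmer.toList.length : Int) 1) distance.toNat)
    (init := ([] : List String))
    (f := fun acc positions =>
      List.foldl
        (fun acc reps =>
          acc ++ [String.ofList ((positions.zip reps).foldl (pvStepA alphabet.toList) kmer.toList)]) acc
        (pvProdRep ((alphabet.toList.length : Int) - 1) distance.toNat))
    (g := fun acc positions =>
      acc ++ (pvProdRep ((alphabet.toList.length : Int) - 1) distance.toNat).map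
        (fun reps => String.ofList ((positions.zip reps).foldl (pvStepA alphabet.toList) kmer.toList)))
    (fun acc x _ => hinner acc x)
  rw [houter, PySem.List.foldl_append_eq_flatMap, List.nil_append]
  apply List.flatMap_congr
  intro ps hps
  have hsub := PySem.List.sublist_of_mem_combinations hps
  have hlen := PySem.List.length_of_mem_combinations hps
  rw [pvFill_eq kmer.toList alphabet.toList ps kmer.toList hsub rfl (fun q _ => rfl), hlen]

-- ===== VERDICT (by name: the statement is the Claim_ definition above) =====
theorem genCousinsOfD_spec : Claim_equal_genCousinsOfD := by
  intro kmer alphabet distance _ hpre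
  exact pvMain kmer alphabet distance hpre
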